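-- pv_equiv track=rewrite | github.com/MZakriya/Password_Strength_Meter | app.py | has_keyboard_pattern
-- ===== SOURCE A (Python) =====
-- def has_keyboard_pattern(password):
--     keyboard_patterns = [
--         "qwertyuiop", "asdfghjkl", "zxcvbnm",
--         "1234567890", "!@#$%^&*()"
--     ]
--     password_lower = password.lower()
--     for pattern in keyboard_patterns:
--         if password_lower in pattern or password_lower in pattern[::-1]:
--             return True
--     return False
-- ===== SOURCE B (Python) =====
-- _KEYBOARD_PATTERNS = [
--     "qwertyuiop", "asdfghjkl", "zxcvbnm",
--     "1234567890", "!@#$%^&*()"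
-- ]
--
-- _SUBSTRINGS = set()
-- _SUBSTRINGS.add("")  # empty password is "in" every pattern
-- for _p in _KEYBOARD_PATTERNS:
--     for _s in (_p, _p[::-1]):
--         for _i in range(len(_s)):
--             for _j in range(_i + 1, len(_s) + 1):
--                 _SUBSTRINGS.add(_s[_i:_j])
--
--
-- def has_keyboard_pattern(password):
--     return password.lower() in _SUBSTRINGS
-- ===== Notes on version B (the rewrite author's own statement) =====
-- stated objective: alternative
-- what changed: Instead of scanning each pattern and its reverse for the lowered password on every call, B precomputes once a set of every substring of each pattern and of each reversed pattern (plus the empty string), and the function body becomes a single set-membership lookup.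
import Mathlib
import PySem

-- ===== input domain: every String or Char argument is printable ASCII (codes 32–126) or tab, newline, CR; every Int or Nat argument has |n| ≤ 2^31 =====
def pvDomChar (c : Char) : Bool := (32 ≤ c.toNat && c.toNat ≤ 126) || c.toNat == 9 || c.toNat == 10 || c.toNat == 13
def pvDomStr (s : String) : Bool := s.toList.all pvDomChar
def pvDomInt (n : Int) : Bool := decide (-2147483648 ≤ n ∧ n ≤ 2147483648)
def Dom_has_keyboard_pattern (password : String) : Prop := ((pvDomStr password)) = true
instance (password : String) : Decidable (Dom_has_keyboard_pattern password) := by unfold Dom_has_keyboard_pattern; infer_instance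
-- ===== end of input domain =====

-- B replaces A's per-call scan of each pattern and its reverse by a one-time precomputed
-- set of all their substrings (plus ""), so the call is a single set-membership lookup.


-- ===== PORT A =====
def pvPatterns : List String :=
  ["qwertyuiop", "asdfghjkl", "zxcvbnm", "1234567890", "!@#$%^&*()"]

-- the for-loop with early return, as structural recursion over the pattern list
def pvLoopA (pl : String) : List String → Bool
  | [] => false
  | p :: ps =>
    if PySem.Str.isIn pl p
        || PySem.Str.isIn pl ((PySem.Str.slice? p none none (-1)).getD "") then true
    else pvLoopA pl ps

def has_keyboard_pattern (password : String) : Bool :=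
  pvLoopA (PySem.Str.lower password) pvPatterns

-- ===== PORT B =====
def pvPatternsB : List String :=
  ["qwertyuiop", "asdfghjkl", "zxcvbnm", "1234567890", "!@#$%^&*()"]

-- inner two loops of Source B: add every substring s[i:j] of s to the set
def pvAddSubs (acc : PySem.Set String) (s : String) : PySem.Set String :=
  (PySem.List.pyRange 0 (PySem.Str.len s) 1).foldl (fun acc i =>
    (PySem.List.pyRange (i + 1) (PySem.Str.len s + 1) 1).foldl (fun acc j =>
      PySem.Set.add acc (PySem.Str.slice s (some i) (some j))) acc) acc

-- the module-level precomputed set _SUBSTRINGS of Source B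
def pvSubs : PySem.Set String :=
  pvPatternsB.foldl (fun acc p =>
      [p, (PySem.Str.slice? p none none (-1)).getD ""].foldl pvAddSubs acc)
    (PySem.Set.add PySem.Set.empty "")

def has_keyboard_pattern_alt (password : String) : Bool :=
  PySem.Set.contains pvSubs (PySem.Str.lower password)

-- ===== PRECONDITION & SPEC =====
def Spec_has_keyboard_pattern (password : String) (out : Bool) : Prop := out = has_keyboard_pattern_alt password
instance (password : String) (out : Bool) : Decidable (Spec_has_keyboard_pattern password out) := by unfold Spec_has_keyboard_pattern; infer_instance

-- ===== CLAIM (what is proved, stated in full; the proofs are below) =====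
def Claim_equal_has_keyboard_pattern : Prop := ∀ (password : String), Dom_has_keyboard_pattern password → Spec_has_keyboard_pattern password (has_keyboard_pattern password)

-- ===== LEMMAS AND PROOFS =====

-- membership in a fold of set-extending steps
theorem pv_mem_foldl {α : Type} (g : PySem.Set String → α → PySem.Set String)
    (P : α → String → Prop)
    (hg : ∀ acc a x, x ∈ g acc a ↔ x ∈ acc ∨ P a x) :
    ∀ (l : List α) (acc : PySem.Set String) (x : String),
      x ∈ l.foldl g acc ↔ x ∈ acc ∨ ∃ a ∈ l, P a x := by
  intro l
  induction l with
  | nil => simp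
  | cons a l ih =>
    intro acc x
    simp only [List.foldl_cons, ih, hg, List.mem_cons]
    constructor
    · rintro (( h | h) | ⟨b, hb, h⟩)
      · exact Or.inl h
      · exact Or.inr ⟨a, Or.inl rfl, h⟩
      · exact Or.inr ⟨b, Or.inr hb, h⟩
    · rintro (h | ⟨b, (rfl | hb), h⟩)
      · exact Or.inl (Or.inl h)
      · exact Or.inl (Or.inr h)
      · exact Or.inr ⟨b, hb, h⟩

theorem pv_mem_addSubs (acc : PySem.Set String) (s x : String) :
    x ∈ pvAddSubs acc s ↔ x ∈ acc ∨
      ∃ i j : Int, 0 ≤ i ∧ i < (s.toList.length : Int) ∧ i + 1 ≤ j ∧ j ≤ (s.toList.length : Int) ∧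
        x = PySem.Str.slice s (some i) (some j) := by
  unfold pvAddSubs
  rw [pv_mem_foldl _ (fun i x => ∃ j, (i + 1 ≤ j ∧ j < (PySem.Str.len s : Int) + 1) ∧
        x = PySem.Str.slice s (some i) (some j))
      (fun acc i x => by
        rw [pv_mem_foldl _ (fun j x => x = PySem.Str.slice s (some i) (some j))
            (fun acc j x => PySem.Set.mem_add acc _ x)]
        simp [PySem.List.mem_pyRange_one])]
  simp only [PySem.List.mem_pyRange_one, PySem.Str.len_eq]
  constructor
  · rintro (h | ⟨i, ⟨h0, hi⟩, j, ⟨hj1, hj2⟩, rfl⟩)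
    · exact Or.inl h
    · exact Or.inr ⟨i, j, h0, hi, hj1, by omega, rfl⟩
  · rintro (h | ⟨i, j, h0, hi, hj1, hj2, rfl⟩)
    · exact Or.inl h
    · exact Or.inr ⟨i, ⟨h0, hi⟩, j, ⟨hj1, by omega⟩, rfl⟩

-- a nonempty list is an infix iff it is one of the enumerated nonempty slices
theorem pv_infix_iff_slice (cs t : List Char) (hcs : cs ≠ []) :
    cs <:+: t ↔
      ∃ i j : Int, 0 ≤ i ∧ i < (t.length : Int) ∧ i + 1 ≤ j ∧ j ≤ (t.length : Int) ∧
        cs = PySem.List.slice t (some i) (some j) := by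
  constructor
  · rintro ⟨pre, suf, rfl⟩
    have hne : cs.length ≠ 0 := by simpa using hcs
    refine ⟨(pre.length : Int), (pre.length : Int) + (cs.length : Int), by positivity, ?_, ?_, ?_, ?_⟩
    · simp only [List.length_append]; push_cast; omega
    · omega
    · simp only [List.length_append]; push_cast; omega
    · rw [show ((pre.length : Int) + (cs.length : Int)) = ((pre.length : Int) + ((cs.length : Nat) : Int)) from rfl,
        PySem.List.slice_natCast_add]
      simp
  · rintro ⟨i, j, h0, hi, hj1, hj2, rfl⟩
    rw [PySem.List.slice_toNat t h0 (by omega)]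
    exact ((t.drop i.toNat).take_prefix _).isInfix.trans (t.drop_suffix i.toNat).isInfix

-- strings are equal iff their char lists are
theorem pv_str_eq_iff (a b : String) : a = b ↔ a.toList = b.toList := by
  constructor
  · rintro rfl; rfl
  · intro h
    simpa using congrArg String.ofList h

theorem pv_mem_subs_iff (x : String) :
    x ∈ pvSubs ↔ x.toList = [] ∨
      ∃ p ∈ pvPatterns, x.toList <:+: p.toList ∨ x.toList <:+: p.toList.reverse := by
  unfold pvSubs
  rw [show pvPatternsB = pvPatterns from rfl]
  rw [pv_mem_foldl _
      (fun p x => x.toList ≠ [] ∧ (x.toList <:+: p.toList ∨ x.toList <:+: p.toList.reverse))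
      (fun acc p x => by
        simp only [List.foldl_cons, List.foldl_nil, pv_mem_addSubs,
          PySem.Str.slice?_none_none_neg_one, Option.getD_some]
        constructor
        · rintro ((h | h) | h)
          · exact Or.inl h
          · rcases h with ⟨i, j, h0, hi, hj1, hj2, rfl⟩
            refine Or.inr ⟨?_, Or.inl ?_⟩
            · simp only [PySem.Str.toList_slice, PySem.Chars.slice_eq_listSlice]
              rw [PySem.List.slice_toNat _ h0 (by omega)]
              simp only [ne_eq, List.take_eq_nil_iff, not_or]
              constructor
              · omega
              · simp only [List.drop_eq_nil_iff]; omega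
            · simp only [PySem.Str.toList_slice, PySem.Chars.slice_eq_listSlice]
              rw [pv_infix_iff_slice]
              · exact ⟨i, j, h0, hi, hj1, hj2, rfl⟩
              · rw [PySem.List.slice_toNat _ h0 (by omega)]
                simp only [ne_eq, List.take_eq_nil_iff, not_or]
                constructor
                · omega
                · simp only [List.drop_eq_nil_iff]; omega
          · rcases h with ⟨i, j, h0, hi, hj1, hj2, rfl⟩
            have hlen : (String.ofList p.toList.reverse).toList = p.toList.reverse := by
              simp
            refine Or.inr ⟨?_, Or.inr ?_⟩
            · simp only [PySem.Str.toList_slice, PySem.Chars.slice_eq_listSlice, hlen] at *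
              rw [PySem.List.slice_toNat _ h0 (by omega)]
              simp only [ne_eq, List.take_eq_nil_iff, not_or]
              constructor
              · omega
              · simp only [List.drop_eq_nil_iff]; simp at hi ⊢; omega
            · simp only [PySem.Str.toList_slice, PySem.Chars.slice_eq_listSlice, hlen] at *
              rw [pv_infix_iff_slice]
              · refine ⟨i, j, h0, by simpa using hi, hj1, by simpa using hj2, rfl⟩
              · rw [PySem.List.slice_toNat _ h0 (by omega)]
                simp only [ne_eq, List.take_eq_nil_iff, not_or]
                constructor
                · omega
                · simp only [List.drop_eq_nil_iff]; simp at hi ⊢; omega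
        · rintro (h | ⟨hne, (h | h)⟩)
          · exact Or.inl (Or.inl h)
          · rw [pv_infix_iff_slice _ _ hne] at h
            rcases h with ⟨i, j, h0, hi, hj1, hj2, h⟩
            refine Or.inl (Or.inr ⟨i, j, h0, hi, hj1, hj2, ?_⟩)
            rw [pv_str_eq_iff]
            simpa using h
          · rw [pv_infix_iff_slice _ _ hne] at h
            rcases h with ⟨i, j, h0, hi, hj1, hj2, h⟩
            have hlen : (String.ofList p.toList.reverse).toList = p.toList.reverse := by simp
            refine Or.inr ⟨i, j, h0, by simpa [hlen] using hi, hj1, by simpa [hlen] using hj2, ?_⟩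
            rw [pv_str_eq_iff]
            simpa [hlen] using h)]
  constructor
  · rintro (h | ⟨p, hp, hne, h⟩)
    · left
      have : x ∈ PySem.Set.add PySem.Set.empty "" := h
      rw [PySem.Set.mem_add] at this
      rcases this with h | rfl
      · simp [PySem.Set.empty] at h
      · rfl
    · exact Or.inr ⟨p, hp, h⟩
  · rintro (h | ⟨p, hp, h⟩)
    · left
      rw [PySem.Set.mem_add]
      right
      rw [pv_str_eq_iff]; simpa using h
    · by_cases hne : x.toList = []
      · left
        rw [PySem.Set.mem_add]
        right
        rw [pv_str_eq_iff]; simpa using hne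
      · exact Or.inr ⟨p, hp, hne, h⟩

theorem pv_loopA_iff (pl : String) (l : List String) :
    pvLoopA pl l = true ↔
      ∃ p ∈ l, pl.toList <:+: p.toList ∨ pl.toList <:+: p.toList.reverse := by
  induction l with
  | nil => simp [pvLoopA]
  | cons p ps ih =>
    simp only [pvLoopA, PySem.Str.slice?_none_none_neg_one, Option.getD_some, List.mem_cons]
    split_ifs with h
    · simp only [true_iff]
      rcases Bool.or_eq_true_iff.mp h with h | h
      · exact ⟨p, Or.inl rfl, Or.inl (by simpa using (PySem.Str.isIn_iff_infix _ _).mp h)⟩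
      · refine ⟨p, Or.inl rfl, Or.inr ?_⟩
        have := (PySem.Str.isIn_iff_infix _ _).mp h
        simpa using this
    · rw [ih]
      constructor
      · rintro ⟨q, hq, hh⟩; exact ⟨q, Or.inr hq, hh⟩
      · rintro ⟨q, (rfl | hq), hh⟩
        · exfalso
          apply h
          rcases hh with hh | hh
          · exact Bool.or_eq_true_iff.mpr (Or.inl ((PySem.Str.isIn_iff_infix _ _).mpr hh))
          · refine Bool.or_eq_true_iff.mpr (Or.inr ((PySem.Str.isIn_iff_infix _ _).mpr (by simpa using hh)))
        · exact ⟨q, hq, hh⟩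

-- ===== VERDICT (by name: the statement is the Claim_ definition above) =====
theorem has_keyboard_pattern_spec : Claim_equal_has_keyboard_pattern := by
  intro password _
  unfold Spec_has_keyboard_pattern has_keyboard_pattern has_keyboard_pattern_alt
  set pl := PySem.Str.lower password with hpl
  rw [Bool.eq_iff_iff, pv_loopA_iff, PySem.Set.contains_iff, pv_mem_subs_iff]
  constructor
  · rintro ⟨p, hp, h⟩
    exact Or.inr ⟨p, hp, h⟩
  · rintro (h | h)
    · refine ⟨"qwertyuiop", by simp [pvPatterns], Or.inl ?_⟩
      rw [h]
      exact List.nil_infix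
    · exact h
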